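-- pv_equiv track=rewrite | github.com/Jaladimanaswitha/compititive-programming | 06-leastfrequentletters-Python/leastfrequentletters.py | leastfrequentletters
-- ===== SOURCE A (Python) =====
-- def leastfrequentletters(s):
-- 	# Your code goes here
-- 	p=''
-- 	for j in s:
-- 		if (j.isalpha()):
-- 			j=j.lower()
-- 			p+=j
-- 		else:
-- 			p+j
-- 	s=p
-- 	a=''
-- 	for i in s:
-- 		if(i.isalpha()):
-- 			if(s.count(i)==1):
-- 				a+=i
-- 	return ''.join(sorted(a))
-- ===== SOURCE B (Python) =====
-- def leastfrequentletters(s):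
--     # sort the lowercased letters, then scan maximal runs; keep runs of length 1
--     letters = sorted(c.lower() for c in s if c.isalpha())
--     out = []
--     i, n = 0, len(letters)
--     while i < n:
--         j = i + 1
--         while j < n and letters[j] == letters[i]:
--             j += 1
--         if j == i + 1:
--             out.append(letters[i])
--         i = j
--     return ''.join(out)
-- ===== Notes on version B (the rewrite author's own statement) =====
-- stated objective: faster
-- what changed: Replaces the quadratic scan (str.count inside a loop over the string) by sort-then-group: sort the lowercased letters once and keep exactly the runs of length 1, which is already the sorted answer.
import Mathlib
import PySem

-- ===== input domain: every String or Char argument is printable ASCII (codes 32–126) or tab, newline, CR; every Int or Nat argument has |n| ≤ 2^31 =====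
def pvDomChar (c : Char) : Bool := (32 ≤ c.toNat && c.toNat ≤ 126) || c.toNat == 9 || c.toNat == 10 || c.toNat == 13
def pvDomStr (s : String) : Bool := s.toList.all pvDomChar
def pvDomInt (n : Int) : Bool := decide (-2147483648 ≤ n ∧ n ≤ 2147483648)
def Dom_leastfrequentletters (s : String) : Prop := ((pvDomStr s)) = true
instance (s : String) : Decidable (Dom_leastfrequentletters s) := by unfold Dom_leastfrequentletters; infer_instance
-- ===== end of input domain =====

-- B replaces A's per-character str.count scan by sort-then-group (keep runs of length 1); objective: faster.

-- ===== PORT A =====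
-- 's.count(i)' with a single-character i is ported as List.count: for a one-character
-- substring Python's non-overlapping substring count equals the element count (exact here).
def leastfrequentletters (s : String) : String :=
  let p : List Char :=
    s.toList.foldl (fun p j => if PySem.Chars.isalpha j then p ++ [PySem.Chars.lowerChar j] else p) []
  let a : List Char :=
    p.foldl (fun a i => if PySem.Chars.isalpha i then (if p.count i == 1 then a ++ [i] else a) else a) []
  String.ofList (PySem.List.sorted a (fun x => x) false)

-- ===== PORT B =====
-- the outer while loop of Source B: scan maximal runs of equal chars, keep a char iff its run has length 1
def pvRuns1 : List Char → List Char
  | [] => []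
  | c :: rest =>
    if (rest.takeWhile (fun x => x == c)).isEmpty then
      c :: pvRuns1 (rest.dropWhile (fun x => x == c))
    else
      pvRuns1 (rest.dropWhile (fun x => x == c))
termination_by l => l.length
decreasing_by
  all_goals simp only [List.length_cons, Nat.lt_succ_iff]; exact List.length_dropWhile_le _ _

def leastfrequentletters_alt (s : String) : String :=
  let letters : List Char :=
    PySem.List.sorted ((s.toList.filter PySem.Chars.isalpha).map PySem.Chars.lowerChar) (fun x => x) false
  String.ofList (pvRuns1 letters)

-- ===== PRECONDITION & SPEC =====
def Spec_leastfrequentletters (s : String) (out : String) : Prop := out = leastfrequentletters_alt s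
instance (s : String) (out : String) : Decidable (Spec_leastfrequentletters s out) := by unfold Spec_leastfrequentletters; infer_instance

-- ===== CLAIM (what is proved, stated in full; the proofs are below) =====
def Claim_equal_leastfrequentletters : Prop := ∀ (s : String), Dom_leastfrequentletters s → Spec_leastfrequentletters s (leastfrequentletters s)

-- ===== LEMMAS AND PROOFS =====

-- lowercasing preserves (the ASCII) isalpha
lemma pv_isalpha_lowerChar (c : Char) (h : PySem.Chars.isalpha c = true) :
    PySem.Chars.isalpha (PySem.Chars.lowerChar c) = true := by
  have hle : ∀ a b : Char, (a ≤ b) ↔ a.toNat ≤ b.toNat := fun a b => Iff.rfl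
  have hA : ('A').toNat = 65 := rfl
  have hZ : ('Z').toNat = 90 := rfl
  have ha : ('a').toNat = 97 := rfl
  have hz : ('z').toNat = 122 := rfl
  simp only [PySem.Chars.isalpha, PySem.Chars.isupper, PySem.Chars.islower,
    PySem.Chars.lowerChar, Bool.or_eq_true, Bool.and_eq_true, decide_eq_true_eq,
    hle, hA, hZ, ha, hz] at h ⊢
  split_ifs with hcase
  · right
    have hv : (Char.ofNat (c.toNat + 32)).toNat = c.toNat + 32 := by
      rw [Char.toNat_ofNat, if_pos]
      unfold Nat.isValidChar
      rcases hcase with ⟨_, h2⟩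
      left
      omega
    rw [hv]
    rcases hcase with ⟨h1, h2⟩
    omega
  · rcases h with h | h
    · exact absurd h hcase
    · exact Or.inr h

-- in a sorted list c :: rest, everything the head run drops is strictly above c, and stays sorted
lemma pv_drop_facts (c : Char) (rest : List Char) (h : (c :: rest).Pairwise (· ≤ ·)) :
    (∀ x ∈ List.dropWhile (fun x => x == c) rest, c < x) ∧
    (List.dropWhile (fun x => x == c) rest).Pairwise (· ≤ ·) := by
  rw [List.pairwise_cons] at h
  refine ⟨?_, h.2.sublist (List.dropWhile_sublist _)⟩
  cases hde : List.dropWhile (fun x => x == c) rest with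
  | nil => simp
  | cons e0 d' =>
    have hw : List.dropWhile (fun x => x == c) rest ≠ [] := by rw [hde]; simp
    have h2 := List.head_dropWhile_not (fun x => x == c) hw
    have h3 : (List.dropWhile (fun x => x == c) rest).head hw = e0 := by simp [hde]
    rw [h3] at h2
    have he0rest : e0 ∈ rest := (List.dropWhile_sublist _).mem (by rw [hde]; simp)
    have hce0 : c < e0 :=
      lt_of_le_of_ne (h.1 e0 he0rest) (by intro hcc; rw [← hcc] at h2; simp at h2)
    have hdpw : (e0 :: d').Pairwise (· ≤ ·) := by
      rw [← hde]; exact h.2.sublist (List.dropWhile_sublist _)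
    rw [List.pairwise_cons] at hdpw
    intro x hx
    rcases List.mem_cons.mp hx with rfl | hx'
    · exact hce0
    · exact lt_of_lt_of_le hce0 (hdpw.1 x hx')

-- splitting the head run: filtering 'count == 1' keeps c iff its run is just [c],
-- and on the remainder the count may be taken locally
lemma pv_filter_split (c : Char) (t d : List Char)
    (htc : ∀ x ∈ t, x = c) (hdlt : ∀ x ∈ d, c < x) :
    List.filter (fun x => List.count x (c :: (t ++ d)) == 1) (c :: (t ++ d)) =
      (if t.isEmpty then [c] else []) ++ List.filter (fun x => List.count x d == 1) d := by
  have hcd : List.count c d = 0 := by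
    rw [List.count_eq_zero]
    intro hmem
    exact absurd rfl (ne_of_gt (hdlt c hmem))
  have hct : List.count c t = t.length := by
    rw [List.count_eq_length]
    intro b hb
    exact (htc b hb).symm
  have hcount : List.count c (c :: (t ++ d)) = 1 + t.length := by
    rw [List.count_cons_self, List.count_append, hcd, hct]
    omega
  have hxd : ∀ x ∈ d, List.count x (c :: (t ++ d)) = List.count x d := by
    intro x hx
    have hxc : c ≠ x := ne_of_lt (hdlt x hx)
    have hxt : List.count x t = 0 := by
      rw [List.count_eq_zero]
      intro hmem
      exact hxc ((htc x hmem).symm)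
    rw [List.count_cons, List.count_append, hxt]
    simp only [beq_iff_eq, if_neg (fun h => hxc h)]
    omega
  rw [List.filter_cons, List.filter_append]
  have htf : List.filter (fun x => List.count x (c :: (t ++ d)) == 1) t = [] := by
    rw [List.filter_eq_nil_iff]
    intro x hx
    rw [htc x hx, hcount]
    have hne : t ≠ [] := by intro hte; rw [hte] at hx; cases hx
    have hpos : 0 < t.length := List.length_pos_iff.mpr hne
    simp only [beq_iff_eq]
    omega
  have hdf : List.filter (fun x => List.count x (c :: (t ++ d)) == 1) d =
      List.filter (fun x => List.count x d == 1) d := by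
    apply List.filter_congr
    intro x hx
    rw [hxd x hx]
  rw [htf, hdf, hcount]
  by_cases hte : t.isEmpty
  · have h0 : t.length = 0 := by simpa [List.isEmpty_iff_length_eq_zero] using hte
    simp [hte, h0]
  · have h0 : t.length ≠ 0 := by
      intro h0
      exact hte (by simpa [List.isEmpty_iff_length_eq_zero] using h0)
    simp only [hte, beq_iff_eq]
    rw [if_neg (by omega)]
    simp

-- on a ≤-sorted list, the run scan keeps exactly the characters of count 1
lemma pv_runs_eq (l : List Char) (h : l.Pairwise (· ≤ ·)) :
    pvRuns1 l = l.filter (fun c => l.count c == 1) := by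
  induction l using pvRuns1.induct with
  | case1 => simp [pvRuns1]
  | case2 c rest hEmp ih =>
    rw [pvRuns1, if_pos hEmp]
    have hsplit := @List.takeWhile_append_dropWhile _ (fun x => x == c) rest
    have htc : ∀ x ∈ List.takeWhile (fun x => x == c) rest, x = c := by
      intro x hx
      exact eq_of_beq (List.mem_takeWhile_imp (p := fun x => x == c) hx)
    obtain ⟨hdlt, hdpw⟩ := pv_drop_facts c rest h
    generalize hT : List.takeWhile (fun x => x == c) rest = t at *
    generalize hD : List.dropWhile (fun x => x == c) rest = d at *
    subst hsplit
    rw [pv_filter_split c t d htc hdlt, if_pos hEmp, ih hdpw]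
    rfl
  | case3 c rest hEmp ih =>
    rw [pvRuns1, if_neg hEmp]
    have hsplit := @List.takeWhile_append_dropWhile _ (fun x => x == c) rest
    have htc : ∀ x ∈ List.takeWhile (fun x => x == c) rest, x = c := by
      intro x hx
      exact eq_of_beq (List.mem_takeWhile_imp (p := fun x => x == c) hx)
    obtain ⟨hdlt, hdpw⟩ := pv_drop_facts c rest h
    generalize hT : List.takeWhile (fun x => x == c) rest = t at *
    generalize hD : List.dropWhile (fun x => x == c) rest = d at *
    subst hsplit
    rw [pv_filter_split c t d htc hdlt, if_neg hEmp, ih hdpw]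
    rfl

theorem pv_main (s : String) :
    leastfrequentletters s = leastfrequentletters_alt s := by
  unfold leastfrequentletters leastfrequentletters_alt
  simp only [PySem.List.foldl_append_if, List.nil_append]
  congr 1
  set q : List Char := (s.toList.filter PySem.Chars.isalpha).map PySem.Chars.lowerChar with hq
  have halpha : ∀ x ∈ q, PySem.Chars.isalpha x = true := by
    intro x hx
    rw [hq] at hx
    obtain ⟨y, hy, rfl⟩ := List.mem_map.mp hx
    exact pv_isalpha_lowerChar y (List.mem_filter.mp hy).2
  have hstep : q.foldl (fun a i => if PySem.Chars.isalpha i then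
      (if q.count i == 1 then a ++ [i] else a) else a) [] =
      q.filter (fun i => q.count i == 1) := by
    rw [PySem.List.foldl_congr_mem q _ (fun a i => if q.count i == 1 then a ++ [i] else a) []
      (fun acc x hx => by rw [if_pos (halpha x hx)])]
    rw [PySem.List.foldl_append_if_eq_filter (fun i => q.count i == 1) q []]
    simp
  rw [hstep]
  have hsp : (PySem.List.sorted q (fun x => x) false).Pairwise (· ≤ ·) :=
    PySem.List.sorted_pairwise q (fun x => x)
  have hperm : (PySem.List.sorted q (fun x => x) false).Perm q := PySem.List.sorted_perm q _ _
  rw [pv_runs_eq _ hsp]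
  have hcong : (PySem.List.sorted q (fun x => x) false).filter
      (fun c => (PySem.List.sorted q (fun x => x) false).count c == 1) =
      (PySem.List.sorted q (fun x => x) false).filter (fun c => q.count c == 1) := by
    apply List.filter_congr
    intro x hx
    rw [hperm.count_eq]
  rw [hcong]
  exact PySem.List.sorted_id_eq_of_perm_of_pairwise _ _
    (hperm.filter _) (hsp.sublist List.filter_sublist)

-- ===== VERDICT (by name: the statement is the Claim_ definition above) =====
theorem leastfrequentletters_spec : Claim_equal_leastfrequentletters := by
  intro s _
  unfold Spec_leastfrequentletters
  exact pv_main s
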